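-- pv_equiv track=rewrite | github.com/samuelchanx/credentials-backup | credentials_backup.py | should_skip_gitignored_file
-- ===== SOURCE A (Python) =====
-- import fnmatch
--
-- def should_skip_gitignored_file(file_path_str: str) -> bool:
--     """Check if a git-ignored file should be skipped"""
--     # Skip build dependency directories and their contents
--     build_dirs = {
--         'ios/pods', 'macos/pods', 'android/app/.cxx', 'android/app/build',
--         'android/build', 'android/.gradle', 'android/gradle',
--         'node_modules', '__pycache__', '.pytest_cache', '.coverage',
--         'coverage', '.nyc_output', 'dist', 'build', '.next', '.nuxt',
--         'target', '.cargo', '.gradle', '.m2', 'venv', 'env', '.venv',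
--         '.env.local', '.env.test', '.env.example', '.env.sample',
--         '.env.template', '.svn', '.hg', '.bzr', '.DS_Store', 'Thumbs.db',
--         'vendor', 'bower_components', '.sass-cache', '.cache',
--         'tmp', 'temp', 'logs', 'log', '.logs'
--     }
--
--     # Check if file is in a build directory
--     file_str = file_path_str.lower()
--     for build_dir in build_dirs:
--         # Check if the path contains the build directory
--         if f'/{build_dir}/' in file_str or file_str.endswith(f'/{build_dir}') or file_str.startswith(f'{build_dir}/'):
--             return True
--
--     # Skip patterns based on file names
--     skip_patterns = {
--         'package-lock.json', 'yarn.lock', 'pnpm-lock.yaml',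
--         'composer.lock', 'Pipfile.lock', 'poetry.lock',
--         'Gemfile.lock', 'go.sum', 'Cargo.lock',
--         '*.log', '*.tmp', '*.temp', '*.cache',
--         '*.pyc', '*.pyo', '*.pyd', '*.so', '*.dylib', '*.dll',
--         '*.exe', '*.bin', '*.o', '*.obj', '*.a', '*.lib',
--         '*.zip', '*.tar', '*.gz', '*.rar', '*.7z',
--         '*.jpg', '*.jpeg', '*.png', '*.gif', '*.bmp', '*.svg',
--         '*.mp3', '*.mp4', '*.avi', '*.mov', '*.wmv',
--         '*.pdf', '*.doc', '*.docx', '*.xls', '*.xlsx',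
--         '*.ppt', '*.pptx', '*.odt', '*.ods', '*.odp',
--         '*.map', '*.min.js', '*.min.css', '*.bundle.js',
--         '*.chunk.js', '*.vendor.js', '*.app.js',
--         # Build artifacts
--         '*.podspec.json', '*.abi.json', '*.xcassets',
--         'prefab_config.json', 'Contents.json'
--     }
--
--     # Skip extensions
--     skip_extensions = {
--         '.log', '.tmp', '.temp', '.cache', '.pyc', '.pyo', '.pyd',
--         '.so', '.dylib', '.dll', '.exe', '.bin', '.o', '.obj',
--         '.a', '.lib', '.zip', '.tar', '.gz', '.rar', '.7z',
--         '.jpg', '.jpeg', '.png', '.gif', '.bmp', '.svg',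
--         '.mp3', '.mp4', '.avi', '.mov', '.wmv',
--         '.pdf', '.doc', '.docx', '.xls', '.xlsx',
--         '.ppt', '.pptx', '.odt', '.ods', '.odp',
--         '.map', '.min.js', '.min.css', '.bundle.js',
--         '.chunk.js', '.vendor.js', '.app.js',
--         '.json', '.h', '.m', '.cc', '.cpp', '.c', '.swift'
--     }
--
--     file_name = file_path_str.split('/')[-1].lower()
--
--     # Check file name patterns
--     for pattern in skip_patterns:
--         if fnmatch.fnmatch(file_name, pattern.lower()):
--             return True
--
--     # Check file extensions
--     if any(file_name.endswith(ext) for ext in skip_extensions):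
--         return True
--
--     return False
-- ===== SOURCE B (Python) =====
-- _BUILD_DIRS = (
--     'ios/pods', 'macos/pods', 'android/app/.cxx', 'android/app/build',
--     'android/build', 'android/.gradle', 'android/gradle',
--     'node_modules', '__pycache__', '.pytest_cache', '.coverage',
--     'coverage', '.nyc_output', 'dist', 'build', '.next', '.nuxt',
--     'target', '.cargo', '.gradle', '.m2', 'venv', 'env', '.venv',
--     '.env.local', '.env.test', '.env.example', '.env.sample',
--     '.env.template', '.svn', '.hg', '.bzr', '.DS_Store', 'Thumbs.db',
--     'vendor', 'bower_components', '.sass-cache', '.cache',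
--     'tmp', 'temp', 'logs', 'log', '.logs'
-- )
--
-- # every '*.xxx' pattern reduced to its '.xxx' suffix, followed by the
-- # extensions that are not already covered by a pattern
-- _NAME_SUFFIXES = (
--     '.log', '.tmp', '.temp', '.cache', '.pyc', '.pyo', '.pyd', '.so',
--     '.dylib', '.dll', '.exe', '.bin', '.o', '.obj', '.a', '.lib',
--     '.zip', '.tar', '.gz', '.rar', '.7z', '.jpg', '.jpeg', '.png',
--     '.gif', '.bmp', '.svg', '.mp3', '.mp4', '.avi', '.mov', '.wmv',
--     '.pdf', '.doc', '.docx', '.xls', '.xlsx', '.ppt', '.pptx', '.odt',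
--     '.ods', '.odp', '.map', '.min.js', '.min.css', '.bundle.js',
--     '.chunk.js', '.vendor.js', '.app.js', '.podspec.json', '.abi.json',
--     '.xcassets', '.json', '.h', '.m', '.cc', '.cpp', '.c', '.swift',
-- )
--
-- # the literal (no '*') skip patterns, pre-lowered for an exact-name lookup
-- _EXACT_NAMES = frozenset((
--     'package-lock.json', 'yarn.lock', 'pnpm-lock.yaml', 'composer.lock',
--     'pipfile.lock', 'poetry.lock', 'gemfile.lock', 'go.sum', 'cargo.lock',
--     'prefab_config.json', 'contents.json',
-- ))
--
--
-- def should_skip_gitignored_file(file_path_str: str) -> bool: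
--     """Check if a git-ignored file should be skipped"""
--     file_str = file_path_str.lower()
--     if any(f'/{d}/' in file_str or file_str.endswith(f'/{d}') or file_str.startswith(f'{d}/')
--            for d in _BUILD_DIRS):
--         return True
--     file_name = file_path_str.split('/')[-1].lower()
--     return file_name in _EXACT_NAMES or file_name.endswith(_NAME_SUFFIXES)
-- ===== Notes on version B (the rewrite author's own statement) =====
-- stated objective: simpler
-- what changed: The fnmatch loop over skip_patterns and the separate extension scan are replaced by one precomputed table: an exact-name frozenset for the literal patterns and a single endswith over a tuple that merges the star-pattern suffixes with the extra extensions; the build-dir loop becomes one any().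
import Mathlib
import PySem

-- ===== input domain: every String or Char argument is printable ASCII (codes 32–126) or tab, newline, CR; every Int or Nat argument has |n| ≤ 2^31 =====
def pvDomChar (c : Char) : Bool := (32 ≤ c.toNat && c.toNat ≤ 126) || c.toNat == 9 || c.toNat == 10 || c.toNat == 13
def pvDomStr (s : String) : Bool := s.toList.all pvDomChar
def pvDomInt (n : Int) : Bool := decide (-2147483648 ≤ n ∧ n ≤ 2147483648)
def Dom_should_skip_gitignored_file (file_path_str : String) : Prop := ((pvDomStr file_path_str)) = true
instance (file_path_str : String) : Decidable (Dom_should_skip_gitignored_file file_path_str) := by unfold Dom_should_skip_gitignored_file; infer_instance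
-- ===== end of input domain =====

set_option maxRecDepth 8192


-- B replaces A's fnmatch loop and separate extension scan by a precomputed exact-name set
-- and one merged suffix table (objective: simpler); the return value is proved identical.

-- ===== PORT A =====

def pvBuildDirs : List String := [
  "ios/pods", "macos/pods", "android/app/.cxx", "android/app/build", "android/build",
  "android/.gradle", "android/gradle", "node_modules", "__pycache__", ".pytest_cache",
  ".coverage", "coverage", ".nyc_output", "dist", "build",
  ".next", ".nuxt", "target", ".cargo", ".gradle",
  ".m2", "venv", "env", ".venv", ".env.local",
  ".env.test", ".env.example", ".env.sample", ".env.template", ".svn",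
  ".hg", ".bzr", ".DS_Store", "Thumbs.db", "vendor",
  "bower_components", ".sass-cache", ".cache", "tmp", "temp",
  "logs", "log", ".logs"]

def pvSkipPatterns : List String := [
  "package-lock.json", "yarn.lock", "pnpm-lock.yaml", "composer.lock", "Pipfile.lock",
  "poetry.lock", "Gemfile.lock", "go.sum", "Cargo.lock", "*.log",
  "*.tmp", "*.temp", "*.cache", "*.pyc", "*.pyo",
  "*.pyd", "*.so", "*.dylib", "*.dll", "*.exe",
  "*.bin", "*.o", "*.obj", "*.a", "*.lib",
  "*.zip", "*.tar", "*.gz", "*.rar", "*.7z",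
  "*.jpg", "*.jpeg", "*.png", "*.gif", "*.bmp",
  "*.svg", "*.mp3", "*.mp4", "*.avi", "*.mov",
  "*.wmv", "*.pdf", "*.doc", "*.docx", "*.xls",
  "*.xlsx", "*.ppt", "*.pptx", "*.odt", "*.ods",
  "*.odp", "*.map", "*.min.js", "*.min.css", "*.bundle.js",
  "*.chunk.js", "*.vendor.js", "*.app.js", "*.podspec.json", "*.abi.json",
  "*.xcassets", "prefab_config.json", "Contents.json"]

def pvSkipExtensions : List String := [
  ".log", ".tmp", ".temp", ".cache", ".pyc",
  ".pyo", ".pyd", ".so", ".dylib", ".dll",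
  ".exe", ".bin", ".o", ".obj", ".a",
  ".lib", ".zip", ".tar", ".gz", ".rar",
  ".7z", ".jpg", ".jpeg", ".png", ".gif",
  ".bmp", ".svg", ".mp3", ".mp4", ".avi",
  ".mov", ".wmv", ".pdf", ".doc", ".docx",
  ".xls", ".xlsx", ".ppt", ".pptx", ".odt",
  ".ods", ".odp", ".map", ".min.js", ".min.css",
  ".bundle.js", ".chunk.js", ".vendor.js", ".app.js", ".json",
  ".h", ".m", ".cc", ".cpp", ".c",
  ".swift"]

-- fnmatch.fnmatch for patterns whose only wildcard is '*' (the only kind A uses);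
-- os.path.normcase is the identity on POSIX, so no extra case folding happens here.
def pvFnmatch : List Char → List Char → Bool
  | [], [] => true
  | [], p :: ps => if p = '*' then pvFnmatch [] ps else false
  | _ :: _, [] => false
  | c :: ns, p :: ps =>
    if p = '*' then pvFnmatch (c :: ns) ps || pvFnmatch ns (p :: ps)
    else (c == p) && pvFnmatch ns ps
termination_by n p => (n.length, p.length)

-- "for build_dir in build_dirs: if … : return True"
def pvLoopBuild (file_str : List Char) : List String → Bool
  | [] => false
  | d :: ds =>
    if PySem.Chars.isIn ('/' :: d.toList ++ ['/']) file_str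
        || PySem.Chars.endswith file_str ('/' :: d.toList)
        || PySem.Chars.startswith file_str (d.toList ++ ['/']) then true
    else pvLoopBuild file_str ds

-- "for pattern in skip_patterns: if fnmatch.fnmatch(file_name, pattern.lower()): return True"
def pvLoopPat (file_name : List Char) : List String → Bool
  | [] => false
  | p :: ps =>
    if pvFnmatch file_name (PySem.Chars.lower p.toList) then true
    else pvLoopPat file_name ps

def should_skip_gitignored_file (file_path_str : String) : Bool :=
  let file_str := PySem.Chars.lower file_path_str.toList
  if pvLoopBuild file_str pvBuildDirs then true
  else
    -- split('/') always yields a non-empty list, so [-1] never raises; getD [] is unreachable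
    let file_name := PySem.Chars.lower
      ((PySem.List.pyGet? (PySem.Chars.splitOn file_path_str.toList ['/']) (-1)).getD [])
    if pvLoopPat file_name pvSkipPatterns then true
    else if pvSkipExtensions.any (fun ext => PySem.Chars.endswith file_name ext.toList) then true
    else false

-- ===== PORT B =====

def pvBuildDirsAlt : List String := [
  "ios/pods", "macos/pods", "android/app/.cxx", "android/app/build", "android/build",
  "android/.gradle", "android/gradle", "node_modules", "__pycache__", ".pytest_cache",
  ".coverage", "coverage", ".nyc_output", "dist", "build",
  ".next", ".nuxt", "target", ".cargo", ".gradle",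
  ".m2", "venv", "env", ".venv", ".env.local",
  ".env.test", ".env.example", ".env.sample", ".env.template", ".svn",
  ".hg", ".bzr", ".DS_Store", "Thumbs.db", "vendor",
  "bower_components", ".sass-cache", ".cache", "tmp", "temp",
  "logs", "log", ".logs"]

-- every '*.xxx' pattern reduced to its '.xxx' suffix, then the extensions not already covered
def pvNameSuffixes : List String := [
  ".log", ".tmp", ".temp", ".cache", ".pyc",
  ".pyo", ".pyd", ".so", ".dylib", ".dll",
  ".exe", ".bin", ".o", ".obj", ".a",
  ".lib", ".zip", ".tar", ".gz", ".rar",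
  ".7z", ".jpg", ".jpeg", ".png", ".gif",
  ".bmp", ".svg", ".mp3", ".mp4", ".avi",
  ".mov", ".wmv", ".pdf", ".doc", ".docx",
  ".xls", ".xlsx", ".ppt", ".pptx", ".odt",
  ".ods", ".odp", ".map", ".min.js", ".min.css",
  ".bundle.js", ".chunk.js", ".vendor.js", ".app.js", ".podspec.json",
  ".abi.json", ".xcassets", ".json", ".h", ".m",
  ".cc", ".cpp", ".c", ".swift"]

-- the literal (no '*') skip patterns, pre-lowered for an exact-name lookup (a frozenset)
def pvExactNames : List String := [
  "package-lock.json", "yarn.lock", "pnpm-lock.yaml", "composer.lock", "pipfile.lock",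
  "poetry.lock", "gemfile.lock", "go.sum", "cargo.lock", "prefab_config.json",
  "contents.json"]

def should_skip_gitignored_file_alt (file_path_str : String) : Bool :=
  let file_str := PySem.Chars.lower file_path_str.toList
  if pvBuildDirsAlt.any (fun d =>
      PySem.Chars.isIn ('/' :: d.toList ++ ['/']) file_str
        || PySem.Chars.endswith file_str ('/' :: d.toList)
        || PySem.Chars.startswith file_str (d.toList ++ ['/'])) then true
  else
    -- split('/') always yields a non-empty list, so [-1] never raises; getD [] is unreachable
    let file_name := PySem.Chars.lower
      ((PySem.List.pyGet? (PySem.Chars.splitOn file_path_str.toList ['/']) (-1)).getD [])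
    PySem.Set.contains (pvExactNames.map String.toList) file_name
      || pvNameSuffixes.any (fun suf => PySem.Chars.endswith file_name suf.toList)

-- ===== PRECONDITION & SPEC =====
def Spec_should_skip_gitignored_file (file_path_str : String) (out : Bool) : Prop := out = should_skip_gitignored_file_alt file_path_str
instance (file_path_str : String) (out : Bool) : Decidable (Spec_should_skip_gitignored_file file_path_str out) := by unfold Spec_should_skip_gitignored_file; infer_instance

-- ===== CLAIM (what is proved, stated in full; the proofs are below) =====
def Claim_equal_should_skip_gitignored_file : Prop := ∀ (file_path_str : String), Dom_should_skip_gitignored_file file_path_str → Spec_should_skip_gitignored_file file_path_str (should_skip_gitignored_file file_path_str)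

-- ===== LEMMAS AND PROOFS =====

-- proof helpers: A's literal patterns before / after the '*.xxx' block, and the '*' suffixes
def pvLits1 : List String := [
  "package-lock.json", "yarn.lock", "pnpm-lock.yaml", "composer.lock", "pipfile.lock",
  "poetry.lock", "gemfile.lock", "go.sum", "cargo.lock"]
def pvLits2 : List String := [
  "prefab_config.json", "contents.json"]
def pvStarSufs : List String := [
  ".log", ".tmp", ".temp", ".cache", ".pyc",
  ".pyo", ".pyd", ".so", ".dylib", ".dll",
  ".exe", ".bin", ".o", ".obj", ".a",
  ".lib", ".zip", ".tar", ".gz", ".rar",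
  ".7z", ".jpg", ".jpeg", ".png", ".gif",
  ".bmp", ".svg", ".mp3", ".mp4", ".avi",
  ".mov", ".wmv", ".pdf", ".doc", ".docx",
  ".xls", ".xlsx", ".ppt", ".pptx", ".odt",
  ".ods", ".odp", ".map", ".min.js", ".min.css",
  ".bundle.js", ".chunk.js", ".vendor.js", ".app.js", ".podspec.json",
  ".abi.json", ".xcassets"]

theorem pvLoopBuild_eq_any (fs : List Char) (l : List String) :
    pvLoopBuild fs l = l.any (fun d =>
      PySem.Chars.isIn ('/' :: d.toList ++ ['/']) fs
        || PySem.Chars.endswith fs ('/' :: d.toList)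
        || PySem.Chars.startswith fs (d.toList ++ ['/'])) := by
  induction l with
  | nil => rfl
  | cons d ds ih => simp only [pvLoopBuild, List.any_cons]; split <;> simp_all

theorem pvLoopPat_eq_any (fn : List Char) (l : List String) :
    pvLoopPat fn l = l.any (fun p => pvFnmatch fn (PySem.Chars.lower p.toList)) := by
  induction l with
  | nil => rfl
  | cons p ps ih => simp only [pvLoopPat, List.any_cons]; split <;> simp_all

theorem pvFnmatch_nil_star (q : List Char) : pvFnmatch [] ('*' :: q) = pvFnmatch [] q := by
  rw [pvFnmatch]; simp

theorem pvFnmatch_cons_star (c : Char) (ns q : List Char) :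
    pvFnmatch (c :: ns) ('*' :: q) = (pvFnmatch (c :: ns) q || pvFnmatch ns ('*' :: q)) := by
  rw [pvFnmatch]; simp

theorem pvEndswith_nil (q : List Char) : PySem.Chars.endswith [] q = (([] : List Char) == q) := by
  cases q with
  | nil => decide
  | cons a as =>
    have h : ¬ (a :: as) <:+ ([] : List Char) := by simp
    have hiff := PySem.Chars.endswith_iff ([] : List Char) (a :: as)
    cases he : PySem.Chars.endswith ([] : List Char) (a :: as)
    · simp
    · exact absurd (hiff.mp he) h

theorem pvFnmatch_no_star (n q : List Char) (h : q.contains '*' = false) :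
    pvFnmatch n q = (n == q) := by
  induction q generalizing n with
  | nil => cases n <;> simp [pvFnmatch]
  | cons a qs ih =>
    have ha : a ≠ '*' := by simp at h; exact fun e => absurd e.symm h.1
    have hqs : qs.contains '*' = false := by simp at h; simpa using h.2
    cases n with
    | nil => rw [pvFnmatch]; simp [ha]
    | cons c ns => rw [pvFnmatch]; simp [ha, ih ns hqs, List.cons_beq_cons]

theorem pvFnmatch_star (n q : List Char) (h : q.contains '*' = false) :
    pvFnmatch n ('*' :: q) = PySem.Chars.endswith n q := by
  induction n with
  | nil => rw [pvFnmatch_nil_star, pvFnmatch_no_star _ _ h, pvEndswith_nil]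
  | cons c ns ih =>
    rw [pvFnmatch_cons_star, pvFnmatch_no_star _ _ h, ih]
    have hiff := PySem.Chars.endswith_iff (c :: ns) q
    have hiff2 := PySem.Chars.endswith_iff ns q
    cases he : PySem.Chars.endswith (c :: ns) q <;> cases he2 : PySem.Chars.endswith ns q <;>
      cases hq : ((c :: ns) == q) <;> simp_all [List.suffix_cons_iff]

theorem pvAny_congr_mem {α : Type} (l1 l2 : List α) (f : α → Bool)
    (h12 : l1 ⊆ l2) (h21 : l2 ⊆ l1) : l1.any f = l2.any f := by
  cases h1 : l1.any f <;> cases h2 : l2.any f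
  · rfl
  · rw [List.any_eq_false] at h1; rw [List.any_eq_true] at h2
    obtain ⟨a, ha, hf⟩ := h2; exact absurd hf (by simp [h1 a (h21 ha)])
  · rw [List.any_eq_false] at h2; rw [List.any_eq_true] at h1
    obtain ⟨a, ha, hf⟩ := h1; exact absurd hf (by simp [h2 a (h12 ha)])
  · rfl

theorem pvAny_congr {α : Type} (l : List α) (f g : α → Bool)
    (h : ∀ a ∈ l, f a = g a) : l.any f = l.any g := by
  induction l with
  | nil => rfl
  | cons a as ih => simp_all [List.any_cons]

theorem pvMap_lower_pats :
    pvSkipPatterns.map (fun p => PySem.Chars.lower p.toList)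
      = pvLits1.map String.toList
          ++ (pvStarSufs.map (fun s => '*' :: s.toList) ++ pvLits2.map String.toList) := by
  decide

theorem pvPatPart_eq (fn : List Char) :
    pvLoopPat fn pvSkipPatterns
      = (pvLits1.any (fun e => fn == e.toList)
          || (pvStarSufs.any (fun s => PySem.Chars.endswith fn s.toList)
              || pvLits2.any (fun e => fn == e.toList))) := by
  rw [pvLoopPat_eq_any]
  have h1 : pvSkipPatterns.any (fun p => pvFnmatch fn (PySem.Chars.lower p.toList))
      = (pvSkipPatterns.map (fun p => PySem.Chars.lower p.toList)).any (fun q => pvFnmatch fn q) := by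
    rw [List.any_map]; rfl
  rw [h1, pvMap_lower_pats, List.any_append, List.any_append,
    List.any_map, List.any_map, List.any_map]
  congr 1
  · exact pvAny_congr _ _ _ (fun e he => pvFnmatch_no_star fn e.toList (by
      revert he; revert e; decide))
  congr 1
  · exact pvAny_congr _ _ _ (fun s hs => pvFnmatch_star fn s.toList (by
      revert hs; revert s; decide))
  · exact pvAny_congr _ _ _ (fun e he => pvFnmatch_no_star fn e.toList (by
      revert he; revert e; decide))

theorem pvSuffixes_eq (fn : List Char) :
    pvNameSuffixes.any (fun suf => PySem.Chars.endswith fn suf.toList)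
      = (pvStarSufs.any (fun suf => PySem.Chars.endswith fn suf.toList)
          || pvSkipExtensions.any (fun suf => PySem.Chars.endswith fn suf.toList)) := by
  rw [← List.any_append]
  exact pvAny_congr_mem _ _ _ (by decide) (by decide)

theorem pvExact_eq (fn : List Char) :
    PySem.Set.contains (pvExactNames.map String.toList) fn
      = (pvLits1.any (fun e => fn == e.toList) || pvLits2.any (fun e => fn == e.toList)) := by
  have h : pvExactNames.map String.toList = pvLits1.map String.toList ++ pvLits2.map String.toList := by
    decide
  rw [PySem.Set.contains_eq_listContains, h, List.contains_eq_any_beq,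
    List.any_append, List.any_map, List.any_map]
  rfl

theorem pvShuffle (e1 s e2 x : Bool) :
    (if (e1 || (s || e2)) then true else if x then true else false) = ((e1 || e2) || (s || x)) := by
  cases e1 <;> cases s <;> cases e2 <;> cases x <;> rfl

-- ===== VERDICT (by name: the statement is the Claim_ definition above) =====
theorem should_skip_gitignored_file_spec : Claim_equal_should_skip_gitignored_file := by
  intro fp _
  unfold Spec_should_skip_gitignored_file
  simp only [should_skip_gitignored_file, should_skip_gitignored_file_alt]
  rw [pvLoopBuild_eq_any]
  have hb : pvBuildDirs = pvBuildDirsAlt := rfl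
  rw [hb]
  split
  · rfl
  · rw [pvPatPart_eq, pvExact_eq, pvSuffixes_eq]
    exact pvShuffle _ _ _ _
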